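-- pv_equiv track=rewrite | github.com/zhangyong78/qqokx | okx_quant/signal_replay_engine.py | _merge_hit_rules
-- ===== SOURCE A (Python) =====
-- def _merge_hit_rules(
--     large_move_hits: tuple[tuple[str, ...], ...],
--     indices: tuple[int, ...],
-- ) -> tuple[str, ...]:
--     rules: list[str] = []
--     for index in indices:
--         if not (0 <= index < len(large_move_hits)):
--             continue
--         for rule in large_move_hits[index]:
--             if rule not in rules:
--                 rules.append(rule)
--     return tuple(rules)
-- ===== SOURCE B (Python) =====
-- def _merge_hit_rules(
--     large_move_hits: tuple[tuple[str, ...], ...],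
--     indices: tuple[int, ...],
-- ) -> tuple[str, ...]:
--     n = len(large_move_hits)
--     flat = [rule for index in indices if 0 <= index < n
--             for rule in large_move_hits[index]]
--     return tuple(rule for pos, rule in enumerate(flat) if flat.index(rule) == pos)
-- ===== Notes on version B (the rewrite author's own statement) =====
-- stated objective: alternative
-- what changed: A accumulates a result list and interleaves a membership check against that growing output with appending; B is stateless: it flattens all in-range hit tuples into one stream and then keeps exactly the elements standing at their first-occurrence position (flat.index(rule) == pos), a pure filter with no accumulated seen-state.
import Mathlib
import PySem

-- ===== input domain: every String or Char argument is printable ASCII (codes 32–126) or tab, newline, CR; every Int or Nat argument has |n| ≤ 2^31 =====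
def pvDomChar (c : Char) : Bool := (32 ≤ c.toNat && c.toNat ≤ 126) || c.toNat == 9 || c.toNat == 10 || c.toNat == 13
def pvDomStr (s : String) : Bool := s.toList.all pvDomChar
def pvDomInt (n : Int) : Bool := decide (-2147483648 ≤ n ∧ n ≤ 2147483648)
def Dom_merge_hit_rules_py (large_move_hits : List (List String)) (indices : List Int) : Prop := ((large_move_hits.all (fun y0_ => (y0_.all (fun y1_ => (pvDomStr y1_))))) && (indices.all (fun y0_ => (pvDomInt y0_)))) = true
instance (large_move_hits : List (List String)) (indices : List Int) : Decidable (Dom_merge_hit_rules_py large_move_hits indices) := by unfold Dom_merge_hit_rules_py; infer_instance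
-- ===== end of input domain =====

-- B replaces A's interleaved seen-list accumulation by a stateless flatten-then-filter-by-first-occurrence-position pass (alternative decomposition, same cost class).

-- ===== PORT A =====
-- port of A: one loop over indices; in-range guard; inner loop appending each rule not already present
def merge_hit_rules_py (large_move_hits : List (List String)) (indices : List Int) : List String :=
  indices.foldl (fun rules index =>
    if 0 ≤ index ∧ index < (large_move_hits.length : Int) then
      (PySem.List.pyGetD large_move_hits index []).foldl
        (fun rs rule => if rs.contains rule then rs else rs ++ [rule]) rules
    else rules) []

-- ===== PORT B =====
-- port of B: flatten all in-range hit tuples into one stream, then keep exactly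
-- the elements standing at their first-occurrence position (flat.index(rule) == pos)
def merge_hit_rules_py_alt (large_move_hits : List (List String)) (indices : List Int) : List String :=
  let flat := indices.flatMap (fun index =>
    if 0 ≤ index ∧ index < (large_move_hits.length : Int) then
      PySem.List.pyGetD large_move_hits index []
    else [])
  ((PySem.List.enumerate flat 0).filter
      (fun p => ((PySem.List.index? flat p.2).map (fun k => (k : Int))) == some p.1)).map (·.2)

-- ===== PRECONDITION & SPEC =====
def Spec_merge_hit_rules_py (large_move_hits : List (List String)) (indices : List Int) (out : List String) : Prop := out = merge_hit_rules_py_alt large_move_hits indices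
instance (large_move_hits : List (List String)) (indices : List Int) (out : List String) : Decidable (Spec_merge_hit_rules_py large_move_hits indices out) := by unfold Spec_merge_hit_rules_py; infer_instance

-- ===== CLAIM (what is proved, stated in full; the proofs are below) =====
def Claim_equal_merge_hit_rules_py : Prop := ∀ (large_move_hits : List (List String)) (indices : List Int), Dom_merge_hit_rules_py large_move_hits indices → Spec_merge_hit_rules_py large_move_hits indices (merge_hit_rules_py large_move_hits indices)

-- ===== LEMMAS AND PROOFS =====

-- A's inner append-if-absent step is exactly PySem.Set.add
theorem insert_eq_set_add :
    (fun (rs : List String) (rule : String) => if rs.contains rule then rs else rs ++ [rule])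
      = PySem.Set.add := by
  funext rs rule
  simp [PySem.Set.add]

-- A's interleaved loop starting from the dedup of `acc` is the dedup of the flat collection
theorem merge_key (large_move_hits : List (List String)) :
    ∀ (indices : List Int) (acc : List String),
      indices.foldl (fun rules index =>
        if 0 ≤ index ∧ index < (large_move_hits.length : Int) then
          (PySem.List.pyGetD large_move_hits index []).foldl
            (fun rs rule => if rs.contains rule then rs else rs ++ [rule]) rules
        else rules) (PySem.List.dedup acc)
      = PySem.List.dedup (indices.foldl (fun acc index =>
          if 0 ≤ index ∧ index < (large_move_hits.length : Int) then
            acc ++ PySem.List.pyGetD large_move_hits index []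
          else acc) acc) := by
  intro indices
  induction indices with
  | nil => intro acc; rfl
  | cons i rest ih =>
    intro acc
    by_cases h : 0 ≤ i ∧ i < (large_move_hits.length : Int)
    · simp only [List.foldl_cons, if_pos h]
      rw [← ih (acc ++ PySem.List.pyGetD large_move_hits i [])]
      congr 1
      rw [insert_eq_set_add]
      simp [PySem.List.dedup, PySem.Set.ofList, List.foldl_append]
    · simp only [List.foldl_cons, if_neg h]
      exact ih acc

-- deduping the remaining stream from the dedup of a prefix equals appending the
-- elements of the stream standing at their first-occurrence position in the whole list
theorem firstOcc_key (L : List String) :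
    ∀ (suf pre : List String), L = pre ++ suf →
      suf.foldl PySem.Set.add (PySem.List.dedup pre)
        = PySem.List.dedup pre ++
          ((PySem.List.enumerate suf (pre.length : Int)).filter
            (fun p => ((PySem.List.index? L p.2).map (fun k => (k : Int))) == some p.1)).map (·.2) := by
  intro suf
  induction suf with
  | nil => intro pre _; simp [PySem.List.enumerate_nil]
  | cons x rest ih =>
    intro pre hL
    have hdedup : PySem.List.dedup (pre ++ [x]) = PySem.Set.add (PySem.List.dedup pre) x := by
      simp [PySem.List.dedup, PySem.Set.ofList, List.foldl_append]
    have hIH := ih (pre ++ [x]) (by simpa [List.append_assoc] using hL)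
    have hlen : (((pre ++ [x]).length : Nat) : Int) = (pre.length : Int) + 1 := by
      simp
    rw [hlen] at hIH
    by_cases hx : x ∈ pre
    · -- x already seen: it is dropped on both sides
      have hmem : x ∈ PySem.List.dedup pre := (PySem.List.mem_dedup pre x).2 hx
      have hadd : PySem.Set.add (PySem.List.dedup pre) x = PySem.List.dedup pre := by
        simp [PySem.Set.add, hx]
      have hidx : PySem.List.index? L x = PySem.List.index? pre x := by
        rw [hL]; exact PySem.List.index?_append_of_mem _ hx
      have hlt : ∀ k, PySem.List.index? pre x = some k → k < pre.length := by
        intro k hk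
        obtain ⟨p, s, hps, hplen, _⟩ := (PySem.List.index?_eq_some_iff pre x k).1 hk
        rw [hps, ← hplen]; simp
      have hcond : (((PySem.List.index? L x).map (fun k => (k : Int))) == some (pre.length : Int)) = false := by
        rw [hidx]
        cases hq : PySem.List.index? pre x with
        | none => simp
        | some k =>
          have hk := hlt k hq
          simp only [beq_eq_false_iff_ne, ne_eq]
          intro hEq
          simp at hEq
          omega
      rw [List.foldl_cons, hadd, PySem.List.enumerate_cons, List.filter_cons]
      rw [hdedup, hadd] at hIH
      rw [hIH]
      simp only [hcond, Bool.false_eq_true, if_false]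
    · -- x new: kept on both sides at position pre.length
      have hmem : x ∉ PySem.List.dedup pre := fun h => hx ((PySem.List.mem_dedup pre x).1 h)
      have hadd : PySem.Set.add (PySem.List.dedup pre) x = PySem.List.dedup pre ++ [x] := by
        simp [PySem.Set.add, hx]
      have hidx : PySem.List.index? L x = some pre.length := by
        exact (PySem.List.index?_eq_some_iff L x pre.length).2 ⟨pre, rest, hL, rfl, hx⟩
      have hcond : (((PySem.List.index? L x).map (fun k => (k : Int))) == some (pre.length : Int)) = true := by
        rw [hidx]; simp
      rw [List.foldl_cons, hadd, PySem.List.enumerate_cons, List.filter_cons]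
      rw [hdedup, hadd] at hIH
      rw [hIH]
      simp only [hcond, if_true, List.map_cons]
      simp [List.append_assoc]

-- ===== VERDICT (by name: the statement is the Claim_ definition above) =====
theorem merge_hit_rules_py_spec : Claim_equal_merge_hit_rules_py := by
  intro large_move_hits indices _
  unfold Spec_merge_hit_rules_py
  show merge_hit_rules_py large_move_hits indices
      = ((PySem.List.enumerate (indices.flatMap (fun index =>
            if 0 ≤ index ∧ index < (large_move_hits.length : Int) then
              PySem.List.pyGetD large_move_hits index []
            else [])) 0).filter
          (fun p => ((PySem.List.index? (indices.flatMap (fun index =>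
            if 0 ≤ index ∧ index < (large_move_hits.length : Int) then
              PySem.List.pyGetD large_move_hits index []
            else [])) p.2).map (fun k => (k : Int))) == some p.1)).map (·.2)
  have h1 : merge_hit_rules_py large_move_hits indices
      = PySem.List.dedup (indices.foldl (fun acc index =>
          if 0 ≤ index ∧ index < (large_move_hits.length : Int) then
            acc ++ PySem.List.pyGetD large_move_hits index []
          else acc) []) := by
    have h := merge_key large_move_hits indices []
    unfold merge_hit_rules_py
    simpa using h
  have h2 : indices.foldl (fun acc index =>
      if 0 ≤ index ∧ index < (large_move_hits.length : Int) then
        acc ++ PySem.List.pyGetD large_move_hits index []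
      else acc) [] = indices.flatMap (fun index =>
      if 0 ≤ index ∧ index < (large_move_hits.length : Int) then
        PySem.List.pyGetD large_move_hits index []
      else []) := by
    have hfun : (fun (acc : List String) (index : Int) =>
        if 0 ≤ index ∧ index < (large_move_hits.length : Int) then
          acc ++ PySem.List.pyGetD large_move_hits index []
        else acc) = (fun acc index => acc ++
          (if 0 ≤ index ∧ index < (large_move_hits.length : Int) then
            PySem.List.pyGetD large_move_hits index [] else [])) := by
      funext acc index; split_ifs <;> simp
    rw [hfun]
    simpa using PySem.List.foldl_append_eq_flatMap
      (l := indices)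
      (g := fun index => if 0 ≤ index ∧ index < (large_move_hits.length : Int) then
        PySem.List.pyGetD large_move_hits index [] else [])
      (acc := ([] : List String))
  rw [h1, h2]
  have h3 := firstOcc_key
    (indices.flatMap (fun index =>
      if 0 ≤ index ∧ index < (large_move_hits.length : Int) then
        PySem.List.pyGetD large_move_hits index []
      else []))
    (indices.flatMap (fun index =>
      if 0 ≤ index ∧ index < (large_move_hits.length : Int) then
        PySem.List.pyGetD large_move_hits index []
      else [])) [] (by simp)
  rw [PySem.List.dedup_eq_ofList, PySem.Set.ofList_eq_foldl]
  simpa using h3
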